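-- pv_equiv track=rewrite | github.com/CTSRD-CHERI/l3-cheri-mips-proofs | scripts/LineCountBase.py | removeCommentsAndEmptyLines
-- ===== SOURCE A (Python) =====
-- def getNonCommentAndNewDepth(line, depth, startToken, endToken):
--
--   if (depth < 0):
--     raise Exception("Depth cannot be negative")
--
--   startTokenIndex = line.find(startToken)
--   endTokenIndex = line.find(endToken)
--
--   if (startTokenIndex == -1 and endTokenIndex == -1):
--     nonCommentLine = (line if (depth == 0) else "")
--     return (nonCommentLine, depth)
--
--   elif (startTokenIndex > -1 and (endTokenIndex == -1 or endTokenIndex > startTokenIndex)):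
--     nonCommentStart = (line[:startTokenIndex] if (depth == 0) else "")
--     remainingLine = line[startTokenIndex + len(startToken):]
--     (nonCommentRemaing, newDepth) = \
--       getNonCommentAndNewDepth(remainingLine, depth + 1, startToken, endToken)
--     return (nonCommentStart + nonCommentRemaing, newDepth)
--
--   elif (endTokenIndex > -1 and (startTokenIndex == -1 or startTokenIndex > endTokenIndex)):
--     if (depth == 0):
--       raise Exception("Cannot end comment when depth is already 0")
--     remainingLine = line[endTokenIndex + len(endToken):]
--     return getNonCommentAndNewDepth(remainingLine, depth - 1, startToken, endToken)
--
--   else: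
--     raise Exception("This cannot happen")
--
-- def removeCommentsAndEmptyLines(lines, startToken, endToken):
--
--   depth = 0
--   result = []
--
--   for i in range(0, len(lines)):
--     line = lines[i]
--     try:
--       (nonCommentLine, depth) = getNonCommentAndNewDepth(line, depth, startToken, endToken)
--     except Exception as ex:
--       raise Exception("Exception while processing line %i." % i) from ex
--     trimmedNonCommentLine = nonCommentLine.strip()
--     if (trimmedNonCommentLine != ""):
--       result.append(nonCommentLine)
--
--   return result
-- ===== SOURCE B (Python) =====
-- def stripLine(line, depth, startToken, endToken):
--   # Character-by-character scan: test both tokens at each position instead of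
--   # calling find; kept characters are collected in a list and joined at the end.
--   kept = []
--   i = 0
--   n = len(line)
--   while True:
--     sHere = line.startswith(startToken, i)
--     eHere = line.startswith(endToken, i)
--     if sHere and eHere:
--       raise Exception("Ambiguous comment tokens")
--     if sHere:
--       depth += 1
--       i += len(startToken)
--     elif eHere:
--       if depth == 0:
--         raise Exception("Cannot end comment when depth is already 0")
--       depth -= 1
--       i += len(endToken)
--     elif i < n:
--       if depth == 0:
--         kept.append(line[i])
--       i += 1
--     else:
--       return ("".join(kept), depth)
--
-- def removeCommentsAndEmptyLines(lines, startToken, endToken):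
--   depth = 0
--   result = []
--   for i, line in enumerate(lines):
--     try:
--       (nonComment, depth) = stripLine(line, depth, startToken, endToken)
--     except Exception as ex:
--       raise Exception("Exception while processing line %i." % i) from ex
--     if nonComment.strip() != "":
--       result.append(nonComment)
--   return result
-- ===== Notes on version B (the rewrite author's own statement) =====
-- stated objective: alternative
-- what changed: A's non-tail recursive helper, which locates the next token with find and rebuilds the kept text by concatenation while unwinding, is replaced by a character-by-character cursor scan that tests both tokens with startswith at each position and collects kept characters in a list joined at the end; the outer per-line loop and exception wrapping are kept.
import Mathlib
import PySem

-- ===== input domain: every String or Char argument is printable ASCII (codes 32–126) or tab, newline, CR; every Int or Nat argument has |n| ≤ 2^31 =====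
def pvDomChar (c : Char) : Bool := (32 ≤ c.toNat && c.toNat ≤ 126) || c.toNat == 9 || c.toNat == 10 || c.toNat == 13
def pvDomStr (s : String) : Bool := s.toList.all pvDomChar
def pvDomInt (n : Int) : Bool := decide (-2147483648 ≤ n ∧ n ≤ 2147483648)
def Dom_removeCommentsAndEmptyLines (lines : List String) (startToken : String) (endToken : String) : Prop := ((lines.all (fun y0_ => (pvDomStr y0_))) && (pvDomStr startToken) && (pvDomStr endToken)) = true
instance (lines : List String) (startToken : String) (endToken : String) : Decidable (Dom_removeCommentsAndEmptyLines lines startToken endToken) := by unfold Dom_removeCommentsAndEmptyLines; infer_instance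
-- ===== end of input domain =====

-- B replaces A's find-driven non-tail recursion by a character-by-character cursor scan
-- testing both tokens with startswith at each position; proved to return A's exact value
-- on every input where A raises no exception.

-- ===== PORT A =====
-- getNonCommentAndNewDepth; fuel = line length + 1 (provably enough when both tokens are
-- nonempty); `none` = a Python exception (negative depth, end token at depth 0, the
-- "This cannot happen" tie, or the unbounded recursion reached with an empty token).
def pvAGet (sT eT : List Char) : Nat → List Char → Int → Option (List Char × Int)
  | 0, _, _ => none
  | f+1, line, depth =>
    if depth < 0 then none
    else if PySem.Chars.find line sT = -1 ∧ PySem.Chars.find line eT = -1 then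
      some ((if depth = 0 then line else []), depth)
    else if -1 < PySem.Chars.find line sT ∧ (PySem.Chars.find line eT = -1 ∨ PySem.Chars.find line sT < PySem.Chars.find line eT) then
      match pvAGet sT eT f (PySem.Chars.slice line (some (PySem.Chars.find line sT + (sT.length : Int))) none) (depth + 1) with
      | none => none
      | some (ncr, nd) =>
          some ((if depth = 0 then PySem.Chars.slice line none (some (PySem.Chars.find line sT)) else []) ++ ncr, nd)
    else if -1 < PySem.Chars.find line eT ∧ (PySem.Chars.find line sT = -1 ∨ PySem.Chars.find line eT < PySem.Chars.find line sT) then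
      if depth = 0 then none
      else pvAGet sT eT f (PySem.Chars.slice line (some (PySem.Chars.find line eT + (eT.length : Int))) none) (depth - 1)
    else none

-- the for-loop of removeCommentsAndEmptyLines, threading (depth, result)
def pvAGo (sT eT : List Char) : List String → Int → List String → Option (List String)
  | [], _, result => some result
  | line :: rest, depth, result =>
    match pvAGet sT eT (line.toList.length + 1) line.toList depth with
    | none => none
    | some (nc, nd) =>
        pvAGo sT eT rest nd (if PySem.Chars.strip nc ≠ [] then result ++ [String.ofList nc] else result)

def removeCommentsAndEmptyLines (lines : List String) (startToken : String) (endToken : String) : List String :=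
  match pvAGo startToken.toList endToken.toList lines 0 [] with
  | some r => r
  | none => []   -- Python raises here; excluded by Pre_

-- ===== PORT B =====
-- stripLine: cursor scan, modelled with rem = line[i:]; kept = the collected characters;
-- same fuel style (fuel = line length + 1; `none` = a Python exception / non-termination).
def pvBScan (sT eT : List Char) : Nat → List Char → Int → List Char → Option (List Char × Int)
  | 0, _, _, _ => none
  | f+1, rem, depth, kept =>
    if PySem.Chars.startswith rem sT ∧ PySem.Chars.startswith rem eT then
      none   -- raise "Ambiguous comment tokens"
    else if PySem.Chars.startswith rem sT then
      pvBScan sT eT f (rem.drop sT.length) (depth + 1) kept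
    else if PySem.Chars.startswith rem eT then
      if depth = 0 then none   -- raise "Cannot end comment when depth is already 0"
      else pvBScan sT eT f (rem.drop eT.length) (depth - 1) kept
    else
      match rem with
      | [] => some (kept, depth)
      | c :: rest => pvBScan sT eT f rest depth (if depth = 0 then kept ++ [c] else kept)

def removeCommentsAndEmptyLines_alt (lines : List String) (startToken : String) (endToken : String) : List String :=
  match lines.foldl
      (fun st line => st.bind fun p =>
        (pvBScan startToken.toList endToken.toList (line.toList.length + 1) line.toList p.1 []).map
          fun q => (q.2, if PySem.Chars.strip q.1 ≠ [] then p.2 ++ [String.ofList q.1] else p.2))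
      (some ((0 : Int), ([] : List String))) with
  | some p => p.2
  | none => []

-- ===== PRECONDITION & SPEC =====
-- Pre_ excludes exactly the inputs on which the Python A raises: a line scanned with an
-- empty token (unbounded recursion), a line where the first start- and end-token occurrences
-- coincide ("This cannot happen"), or an end token met at comment depth 0.  Stating where the greedy token scan
-- fails necessarily retraces the token occurrences, but this helper tracks only the sequence
-- of tokens and the depth — it computes no output.
def pvScanLine (sT eT : List Char) : Nat → List Char → Option (List Bool)
  | 0, _ => none
  | f+1, rem =>
    if PySem.Chars.find rem sT = -1 ∧ PySem.Chars.find rem eT = -1 then some []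
    else if ¬ PySem.Chars.find rem sT = -1 ∧ (PySem.Chars.find rem eT = -1 ∨ PySem.Chars.find rem sT < PySem.Chars.find rem eT) then
      (pvScanLine sT eT f (PySem.Chars.slice rem (some (PySem.Chars.find rem sT + (sT.length : Int))) none)).map (true :: ·)
    else if ¬ PySem.Chars.find rem eT = -1 ∧ (PySem.Chars.find rem sT = -1 ∨ PySem.Chars.find rem eT < PySem.Chars.find rem sT) then
      (pvScanLine sT eT f (PySem.Chars.slice rem (some (PySem.Chars.find rem eT + (eT.length : Int))) none)).map (false :: ·)
    else none

def pvDepthLine (d : Int) (ks : List Bool) : Option Int :=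
  ks.foldl (fun od k => od.bind (fun d' => if k then some (d' + 1) else if d' = 0 then none else some (d' - 1))) (some d)

def Pre_removeCommentsAndEmptyLines (lines : List String) (startToken : String) (endToken : String) : Prop :=
  (lines.foldl (fun od line => od.bind fun d =>
      (pvScanLine startToken.toList endToken.toList (line.toList.length + 1) line.toList).bind (pvDepthLine d))
    (some 0)).isSome = true
instance (lines : List String) (startToken : String) (endToken : String) : Decidable (Pre_removeCommentsAndEmptyLines lines startToken endToken) := by unfold Pre_removeCommentsAndEmptyLines; infer_instance

def pvWitness_removeCommentsAndEmptyLines : List String × String × String :=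
  (["a /* b", "c */ d", "   ", "e"], "/*", "*/")

def Spec_removeCommentsAndEmptyLines (lines : List String) (startToken : String) (endToken : String) (out : List String) : Prop := out = removeCommentsAndEmptyLines_alt lines startToken endToken
instance (lines : List String) (startToken : String) (endToken : String) (out : List String) : Decidable (Spec_removeCommentsAndEmptyLines lines startToken endToken out) := by unfold Spec_removeCommentsAndEmptyLines; infer_instance

-- ===== CLAIM (what is proved, stated in full; the proofs are below) =====
def Claim_equal_removeCommentsAndEmptyLines : Prop := ∀ (lines : List String) (startToken : String) (endToken : String), Dom_removeCommentsAndEmptyLines lines startToken endToken → Pre_removeCommentsAndEmptyLines lines startToken endToken → Spec_removeCommentsAndEmptyLines lines startToken endToken (removeCommentsAndEmptyLines lines startToken endToken)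

-- ===== LEMMAS AND PROOFS =====

-- unfolding lemma for pvBScan at successor fuel (the equation compiler splits on rem)
lemma pvBScan_succ (sT eT : List Char) (f : Nat) (rem : List Char) (depth : Int) (kept : List Char) :
    pvBScan sT eT (f+1) rem depth kept =
      if PySem.Chars.startswith rem sT ∧ PySem.Chars.startswith rem eT then none
      else if PySem.Chars.startswith rem sT then
        pvBScan sT eT f (rem.drop sT.length) (depth + 1) kept
      else if PySem.Chars.startswith rem eT then
        if depth = 0 then none
        else pvBScan sT eT f (rem.drop eT.length) (depth - 1) kept
      else
        match rem with
        | [] => some (kept, depth)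
        | c :: rest => pvBScan sT eT f rest depth (if depth = 0 then kept ++ [c] else kept) := by
  cases rem <;> rfl

-- whenever A's helper returns, the returned depth is nonnegative
lemma pvAGet_some_nonneg (sT eT : List Char) : ∀ (f : Nat) (line : List Char) (depth : Int)
    (s : List Char) (d : Int), pvAGet sT eT f line depth = some (s, d) → 0 ≤ d := by
  intro f
  induction f with
  | zero => intro line depth s d h; simp [pvAGet] at h
  | succ f ih =>
    intro line depth s d h
    rw [pvAGet] at h
    by_cases hneg : depth < 0
    · rw [if_pos hneg] at h; simp at h
    rw [if_neg hneg] at h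
    by_cases h1 : PySem.Chars.find line sT = -1 ∧ PySem.Chars.find line eT = -1
    · rw [if_pos h1] at h
      simp only [Option.some.injEq, Prod.mk.injEq] at h
      omega
    rw [if_neg h1] at h
    by_cases h2 : -1 < PySem.Chars.find line sT ∧ (PySem.Chars.find line eT = -1 ∨ PySem.Chars.find line sT < PySem.Chars.find line eT)
    · rw [if_pos h2] at h
      cases hA : pvAGet sT eT f (PySem.Chars.slice line (some (PySem.Chars.find line sT + (sT.length : Int))) none) (depth + 1) with
      | none => rw [hA] at h; simp at h
      | some p =>
          obtain ⟨p1, p2⟩ := p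
          rw [hA] at h
          simp only [Option.some.injEq, Prod.mk.injEq] at h
          exact h.2 ▸ ih _ _ _ _ hA
    rw [if_neg h2] at h
    by_cases h3 : -1 < PySem.Chars.find line eT ∧ (PySem.Chars.find line sT = -1 ∨ PySem.Chars.find line eT < PySem.Chars.find line sT)
    · rw [if_pos h3] at h
      by_cases h0 : depth = 0
      · rw [if_pos h0] at h; simp at h
      · rw [if_neg h0] at h; exact ih _ _ _ _ h
    · rw [if_neg h3] at h; simp at h

-- with an empty token, A's helper never returns (the recursion makes no progress / the tie raises)
lemma pvAGet_none_of_empty (sT eT : List Char) (h : sT = [] ∨ eT = []) :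
    ∀ (f : Nat) (rem : List Char) (depth : Int), pvAGet sT eT f rem depth = none := by
  intro f
  induction f with
  | zero => intro rem depth; rfl
  | succ f ih =>
    intro rem depth
    rw [pvAGet]
    by_cases hneg : depth < 0
    · rw [if_pos hneg]
    rw [if_neg hneg]
    rcases h with hs | he
    · subst hs
      have h0 : PySem.Chars.find rem ([] : List Char) = 0 := PySem.Chars.find_nil rem
      have heb := PySem.Chars.neg_one_le_find rem eT
      rw [if_neg (by omega : ¬ (PySem.Chars.find rem ([] : List Char) = -1 ∧ PySem.Chars.find rem eT = -1))]
      by_cases hc : PySem.Chars.find rem eT = -1 ∨ PySem.Chars.find rem ([] : List Char) < PySem.Chars.find rem eT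
      · rw [if_pos ⟨by omega, hc⟩]
        have hsl : PySem.Chars.slice rem (some (PySem.Chars.find rem ([] : List Char) + ((([] : List Char)).length : Int))) none = rem := by
          simp [h0, PySem.List.slice_zero_start, PySem.List.slice_none_none]
        rw [hsl, ih]
      · rw [if_neg (by intro hco; exact hc hco.2)]
        rw [if_neg (by omega : ¬ (-1 < PySem.Chars.find rem eT ∧ (PySem.Chars.find rem ([] : List Char) = -1 ∨ PySem.Chars.find rem eT < PySem.Chars.find rem ([] : List Char))))]
    · subst he
      have h0 : PySem.Chars.find rem ([] : List Char) = 0 := PySem.Chars.find_nil rem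
      have hsb := PySem.Chars.neg_one_le_find rem sT
      rw [if_neg (by omega : ¬ (PySem.Chars.find rem sT = -1 ∧ PySem.Chars.find rem ([] : List Char) = -1))]
      rw [if_neg (by omega : ¬ (-1 < PySem.Chars.find rem sT ∧ (PySem.Chars.find rem ([] : List Char) = -1 ∨ PySem.Chars.find rem sT < PySem.Chars.find rem ([] : List Char))))]
      by_cases hc : PySem.Chars.find rem sT = -1 ∨ PySem.Chars.find rem ([] : List Char) < PySem.Chars.find rem sT
      · rw [if_pos ⟨by omega, hc⟩]
        have hsl : PySem.Chars.slice rem (some (PySem.Chars.find rem ([] : List Char) + ((([] : List Char)).length : Int))) none = rem := by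
          simp [h0, PySem.List.slice_zero_start, PySem.List.slice_none_none]
        rw [hsl]
        by_cases h0' : depth = 0
        · rw [if_pos h0']
        · rw [if_neg h0', ih]
      · rw [if_neg (by intro hco; exact hc hco.2)]

-- with an empty token, B's scan never returns either
lemma pvBScan_none_of_empty (sT eT : List Char) (h : sT = [] ∨ eT = []) :
    ∀ (f : Nat) (rem : List Char) (depth : Int) (kept : List Char),
      pvBScan sT eT f rem depth kept = none := by
  intro f
  induction f with
  | zero => intro rem depth kept; rfl
  | succ f ih =>
    intro rem depth kept
    rw [pvBScan_succ]
    rcases h with hs | he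
    · subst hs
      have hS : PySem.Chars.startswith rem ([] : List Char) = true :=
        (PySem.Chars.startswith_iff rem []).mpr (List.nil_prefix)
      by_cases hE : PySem.Chars.startswith rem eT = true
      · rw [if_pos ⟨hS, hE⟩]
      · rw [if_neg (by intro hco; exact hE hco.2), if_pos hS]
        simpa using ih rem (depth + 1) kept
    · subst he
      have hE : PySem.Chars.startswith rem ([] : List Char) = true :=
        (PySem.Chars.startswith_iff rem []).mpr (List.nil_prefix)
      by_cases hS : PySem.Chars.startswith rem sT = true
      · rw [if_pos ⟨hS, hE⟩]
      · rw [if_neg (by intro hco; exact hS hco.1), if_neg hS, if_pos hE]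
        by_cases h0 : depth = 0
        · rw [if_pos h0]
        · rw [if_neg h0]
          simpa using ih rem (depth - 1) kept

-- B's scan steps over k token-free positions, appending them when depth = 0
lemma pvBScan_chars (sT eT : List Char) :
    ∀ (k : Nat) (rem : List Char) (depth : Int) (kept : List Char) (fB : Nat),
      k ≤ rem.length → k ≤ fB →
      (∀ i, i < k → ¬ sT <+: rem.drop i) → (∀ i, i < k → ¬ eT <+: rem.drop i) →
      pvBScan sT eT fB rem depth kept
        = pvBScan sT eT (fB - k) (rem.drop k) depth (kept ++ (if depth = 0 then rem.take k else [])) := by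
  intro k
  induction k with
  | zero =>
    intro rem depth kept fB _ _ _ _
    by_cases h0 : depth = 0 <;> simp [h0]
  | succ k ih =>
    intro rem depth kept fB hlen hfB hS hE
    cases rem with
    | nil => simp at hlen
    | cons c rest =>
      obtain ⟨f, rfl⟩ : ∃ f, fB = f + 1 := ⟨fB - 1, by omega⟩
      rw [pvBScan]
      have hS0 : ¬ PySem.Chars.startswith (c :: rest) sT = true := by
        rw [PySem.Chars.startswith_iff]; exact hS 0 (by omega)
      have hE0 : ¬ PySem.Chars.startswith (c :: rest) eT = true := by
        rw [PySem.Chars.startswith_iff]; exact hE 0 (by omega)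
      rw [if_neg (by intro hco; exact hS0 hco.1), if_neg hS0, if_neg hE0]
      rw [ih rest depth (if depth = 0 then kept ++ [c] else kept) f (by simpa using hlen) (by omega)
        (fun i hi => hS (i + 1) (by omega)) (fun i hi => hE (i + 1) (by omega))]
      by_cases h0 : depth = 0 <;> simp [h0, List.append_assoc]

-- main per-line agreement for nonempty tokens
lemma pvBScan_eq_pvAGet (sT eT : List Char) (hs : sT ≠ []) (he : eT ≠ []) :
    ∀ (fA : Nat) (rem : List Char) (depth : Int) (kept : List Char) (fB : Nat),
      0 ≤ depth → rem.length < fA → rem.length < fB →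
      pvBScan sT eT fB rem depth kept
        = (pvAGet sT eT fA rem depth).map (fun p => (kept ++ p.1, p.2)) := by
  intro fA
  induction fA with
  | zero => intro rem depth kept fB _ hA _; omega
  | succ fA ih =>
    intro rem depth kept fB hd hA hB
    have hsb := PySem.Chars.neg_one_le_find rem sT
    have heb := PySem.Chars.neg_one_le_find rem eT
    have hsl := PySem.Chars.find_le_length rem sT
    have hel := PySem.Chars.find_le_length rem eT
    have hlenS : 1 ≤ sT.length := by cases sT with | nil => exact absurd rfl hs | cons a l => simp
    have hlenE : 1 ≤ eT.length := by cases eT with | nil => exact absurd rfl he | cons a l => simp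
    rw [pvAGet, if_neg (by omega : ¬ depth < 0)]
    by_cases h1 : PySem.Chars.find rem sT = -1 ∧ PySem.Chars.find rem eT = -1
    · rw [if_pos h1]
      have hS : ∀ i, ¬ sT <+: rem.drop i := fun i hp =>
        (PySem.Chars.find_eq_neg_one_iff rem sT).mp h1.1 (hp.isInfix.trans (List.drop_suffix i rem).isInfix)
      have hE : ∀ i, ¬ eT <+: rem.drop i := fun i hp =>
        (PySem.Chars.find_eq_neg_one_iff rem eT).mp h1.2 (hp.isInfix.trans (List.drop_suffix i rem).isInfix)
      rw [pvBScan_chars sT eT rem.length rem depth kept fB (le_refl _) (by omega)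
        (fun i _ => hS i) (fun i _ => hE i)]
      obtain ⟨g, hg⟩ : ∃ g, fB - rem.length = g + 1 := ⟨fB - rem.length - 1, by omega⟩
      rw [hg, List.drop_length, pvBScan_succ]
      have hS0 : ¬ PySem.Chars.startswith ([] : List Char) sT = true := by
        rw [PySem.Chars.startswith_iff]; intro hp; exact hs (List.prefix_nil.mp hp)
      have hE0 : ¬ PySem.Chars.startswith ([] : List Char) eT = true := by
        rw [PySem.Chars.startswith_iff]; intro hp; exact he (List.prefix_nil.mp hp)
      rw [if_neg (fun hco => hS0 hco.1), if_neg hS0, if_neg hE0]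
      by_cases h0 : depth = 0 <;> simp [h0, List.take_length]
    · rw [if_neg h1]
      by_cases h2 : -1 < PySem.Chars.find rem sT ∧ (PySem.Chars.find rem eT = -1 ∨ PySem.Chars.find rem sT < PySem.Chars.find rem eT)
      · rw [if_pos h2]
        obtain ⟨k, hk⟩ : ∃ k : Nat, PySem.Chars.find rem sT = (k : Int) :=
          ⟨(PySem.Chars.find rem sT).toNat, by omega⟩
        obtain ⟨hpre, hmin⟩ := PySem.Chars.find_spec (s := rem) (sub := sT) (by omega)
        rw [hk] at hpre hmin
        simp only [Int.toNat_natCast] at hpre hmin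
        have hEk : ∀ i, i ≤ k → ¬ eT <+: rem.drop i := by
          rcases h2.2 with hE1 | hlt
          · intro i _ hp
            exact (PySem.Chars.find_eq_neg_one_iff rem eT).mp hE1 (hp.isInfix.trans (List.drop_suffix i rem).isInfix)
          · intro i hi
            obtain ⟨_, hEmin⟩ := PySem.Chars.find_spec (s := rem) (sub := eT) (by omega)
            exact hEmin i (by omega)
        have hklen : k ≤ rem.length := by omega
        rw [pvBScan_chars sT eT k rem depth kept fB hklen (by omega)
          (fun i hi => hmin i hi) (fun i hi => hEk i (by omega))]
        obtain ⟨g, hg⟩ : ∃ g, fB - k = g + 1 := ⟨fB - k - 1, by omega⟩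
        rw [hg, pvBScan_succ]
        have hSk : PySem.Chars.startswith (rem.drop k) sT = true :=
          (PySem.Chars.startswith_iff _ _).mpr hpre
        have hEk' : ¬ PySem.Chars.startswith (rem.drop k) eT = true := by
          rw [PySem.Chars.startswith_iff]; exact hEk k (le_refl k)
        rw [if_neg (fun hco => hEk' hco.2), if_pos hSk]
        have hkl : k + sT.length ≤ rem.length := by
          have h := hpre.length_le
          simp [List.length_drop] at h
          omega
        have hslice1 : PySem.Chars.slice rem (some (PySem.Chars.find rem sT + (sT.length : Int))) none
            = rem.drop (k + sT.length) := by
          rw [hk]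
          simp only [PySem.Chars.slice]
          rw [show ((k : Int) + (sT.length : Int)) = ((k + sT.length : Nat) : Int) by push_cast; ring,
            PySem.List.slice_from_natCast]
        have hslice2 : PySem.Chars.slice rem none (some (PySem.Chars.find rem sT)) = rem.take k := by
          rw [hk]
          simp only [PySem.Chars.slice]
          rw [PySem.List.slice_to_natCast]
        rw [List.drop_drop, ← hslice1]
        rw [ih (PySem.Chars.slice rem (some (PySem.Chars.find rem sT + (sT.length : Int))) none)
          (depth + 1) (kept ++ (if depth = 0 then rem.take k else [])) g (by omega)
          (by rw [hslice1]; simp [List.length_drop]; omega)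
          (by rw [hslice1]; simp [List.length_drop]; omega)]
        cases pvAGet sT eT fA (PySem.Chars.slice rem (some (PySem.Chars.find rem sT + (sT.length : Int))) none) (depth + 1) with
        | none => rfl
        | some p =>
          rw [hslice2]
          by_cases h0 : depth = 0 <;> simp [h0, List.append_assoc]
      · rw [if_neg h2]
        by_cases h3 : -1 < PySem.Chars.find rem eT ∧ (PySem.Chars.find rem sT = -1 ∨ PySem.Chars.find rem eT < PySem.Chars.find rem sT)
        · rw [if_pos h3]
          obtain ⟨k, hk⟩ : ∃ k : Nat, PySem.Chars.find rem eT = (k : Int) :=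
            ⟨(PySem.Chars.find rem eT).toNat, by omega⟩
          obtain ⟨hpre, hmin⟩ := PySem.Chars.find_spec (s := rem) (sub := eT) (by omega)
          rw [hk] at hpre hmin
          simp only [Int.toNat_natCast] at hpre hmin
          have hSk : ∀ i, i ≤ k → ¬ sT <+: rem.drop i := by
            rcases h3.2 with hS1 | hlt
            · intro i _ hp
              exact (PySem.Chars.find_eq_neg_one_iff rem sT).mp hS1 (hp.isInfix.trans (List.drop_suffix i rem).isInfix)
            · intro i hi
              obtain ⟨_, hSmin⟩ := PySem.Chars.find_spec (s := rem) (sub := sT) (by omega)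
              exact hSmin i (by omega)
          have hklen : k ≤ rem.length := by omega
          rw [pvBScan_chars sT eT k rem depth kept fB hklen (by omega)
            (fun i hi => hSk i (by omega)) (fun i hi => hmin i hi)]
          obtain ⟨g, hg⟩ : ∃ g, fB - k = g + 1 := ⟨fB - k - 1, by omega⟩
          rw [hg, pvBScan_succ]
          have hEk : PySem.Chars.startswith (rem.drop k) eT = true :=
            (PySem.Chars.startswith_iff _ _).mpr hpre
          have hSk' : ¬ PySem.Chars.startswith (rem.drop k) sT = true := by
            rw [PySem.Chars.startswith_iff]; exact hSk k (le_refl k)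
          rw [if_neg (fun hco => hSk' hco.1), if_neg hSk', if_pos hEk]
          by_cases h0 : depth = 0
          · rw [if_pos h0, if_pos h0]; rfl
          · rw [if_neg h0, if_neg h0, if_neg h0, List.append_nil]
            have hkl : k + eT.length ≤ rem.length := by
              have h := hpre.length_le
              simp [List.length_drop] at h
              omega
            have hslice1 : PySem.Chars.slice rem (some (PySem.Chars.find rem eT + (eT.length : Int))) none
                = rem.drop (k + eT.length) := by
              rw [hk]
              simp only [PySem.Chars.slice]
              rw [show ((k : Int) + (eT.length : Int)) = ((k + eT.length : Nat) : Int) by push_cast; ring,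
                PySem.List.slice_from_natCast]
            rw [List.drop_drop, ← hslice1]
            rw [ih (PySem.Chars.slice rem (some (PySem.Chars.find rem eT + (eT.length : Int))) none)
              (depth - 1) kept g (by omega)
              (by rw [hslice1]; simp [List.length_drop]; omega)
              (by rw [hslice1]; simp [List.length_drop]; omega)]
        · rw [if_neg h3]
          -- the tie: both tokens first occur at the same index; A raises, B raises
          have hse : PySem.Chars.find rem sT = PySem.Chars.find rem eT ∧ -1 < PySem.Chars.find rem sT := by
            constructor <;> omega
          obtain ⟨k, hk⟩ : ∃ k : Nat, PySem.Chars.find rem sT = (k : Int) :=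
            ⟨(PySem.Chars.find rem sT).toNat, by omega⟩
          have hke : PySem.Chars.find rem eT = (k : Int) := by omega
          obtain ⟨hpreS, hminS⟩ := PySem.Chars.find_spec (s := rem) (sub := sT) (by omega)
          obtain ⟨hpreE, hminE⟩ := PySem.Chars.find_spec (s := rem) (sub := eT) (by omega)
          rw [hk] at hpreS hminS
          rw [hke] at hpreE hminE
          simp only [Int.toNat_natCast] at hpreS hminS hpreE hminE
          have hklen : k ≤ rem.length := by omega
          rw [pvBScan_chars sT eT k rem depth kept fB hklen (by omega)
            (fun i hi => hminS i hi) (fun i hi => hminE i hi)]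
          obtain ⟨g, hg⟩ : ∃ g, fB - k = g + 1 := ⟨fB - k - 1, by omega⟩
          rw [hg, pvBScan_succ]
          rw [if_pos ⟨(PySem.Chars.startswith_iff _ _).mpr hpreS, (PySem.Chars.startswith_iff _ _).mpr hpreE⟩]
          rfl

-- per-line agreement, all tokens
lemma pvBScan_eq_pvAGet_all (sT eT : List Char) (fA : Nat) (rem : List Char) (depth : Int)
    (kept : List Char) (fB : Nat) (hd : 0 ≤ depth) (hA : rem.length < fA) (hB : rem.length < fB) :
    pvBScan sT eT fB rem depth kept
      = (pvAGet sT eT fA rem depth).map (fun p => (kept ++ p.1, p.2)) := by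
  by_cases hse : sT = [] ∨ eT = []
  · rw [pvBScan_none_of_empty sT eT hse, pvAGet_none_of_empty sT eT hse]; rfl
  · exact pvBScan_eq_pvAGet sT eT (fun h => hse (Or.inl h)) (fun h => hse (Or.inr h))
      fA rem depth kept fB hd hA hB

-- the two outer loops agree
-- once the running state is none (an exception), the fold stays none
lemma pvBFold_none (sT eT : List Char) : ∀ (lines : List String),
    lines.foldl
      (fun st line => st.bind fun p =>
        (pvBScan sT eT (line.toList.length + 1) line.toList p.1 []).map
          fun q => (q.2, if PySem.Chars.strip q.1 ≠ [] then p.2 ++ [String.ofList q.1] else p.2))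
      none = none := by
  intro lines
  induction lines with
  | nil => rfl
  | cons l r ih => simpa using ih

lemma pvBFold_eq (sT eT : List Char) : ∀ (lines : List String) (depth : Int) (result : List String),
    0 ≤ depth →
    (lines.foldl
      (fun st line => st.bind fun p =>
        (pvBScan sT eT (line.toList.length + 1) line.toList p.1 []).map
          fun q => (q.2, if PySem.Chars.strip q.1 ≠ [] then p.2 ++ [String.ofList q.1] else p.2))
      (some (depth, result))).map Prod.snd = pvAGo sT eT lines depth result := by
  intro lines
  induction lines with
  | nil => intro depth result _; rfl
  | cons line rest ih =>
    intro depth result hd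
    rw [List.foldl_cons, pvAGo]
    simp only [Option.bind_some]
    rw [pvBScan_eq_pvAGet_all sT eT (line.toList.length + 1) line.toList depth []
      (line.toList.length + 1) hd (by omega) (by omega)]
    cases hA : pvAGet sT eT (line.toList.length + 1) line.toList depth with
    | none =>
      show (rest.foldl
          (fun st line => st.bind fun p =>
            (pvBScan sT eT (line.toList.length + 1) line.toList p.1 []).map
              fun q => (q.2, if PySem.Chars.strip q.1 ≠ [] then p.2 ++ [String.ofList q.1] else p.2))
          none).map Prod.snd = none
      rw [pvBFold_none]
      rfl
    | some p =>
      obtain ⟨nc, nd⟩ := p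
      simp only [Option.map_some, List.nil_append]
      exact ih nd _ (pvAGet_some_nonneg sT eT _ _ _ _ _ hA)

-- ===== VERDICT (by name: the statement is the Claim_ definition above) =====
theorem removeCommentsAndEmptyLines_spec : Claim_equal_removeCommentsAndEmptyLines := by
  intro lines startToken endToken _ _
  show removeCommentsAndEmptyLines lines startToken endToken = removeCommentsAndEmptyLines_alt lines startToken endToken
  unfold removeCommentsAndEmptyLines removeCommentsAndEmptyLines_alt
  rw [← pvBFold_eq startToken.toList endToken.toList lines 0 [] (le_refl 0)]
  cases lines.foldl _ (some ((0:Int), ([]:List String))) with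
  | none => rfl
  | some p => rfl
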